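-- pv_equiv track=rewrite | github.com/osama-shawir/Classifying-Art-by-Genre-and-Emotion-Evoked | src/data_load/Genre_Files.py | categorize_genre
-- ===== SOURCE A (Python) =====
-- def categorize_genre(genres):
--     """Generate big genre based on sub-genres"""
--     if any(
--         genre in genres
--         for genre in ["Minimalism", "Pop Art", "Pointillism", "Symbolism"]
--     ):
--         return 1
--     elif any(
--         genre in genres
--         for genre in [
--             "Impressionism",
--             "Expressionism",
--             "Post-Impressionism",
--             "Surrealism",
--             "Abstract Expressionism",
--             "Cubism",
--             "Pop Art",
--             "Abstract Art",
--             "Art Informel",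
--             "Color Field Painting",
--             "Neo-Expressionism",
--             "Magic Realism",
--             "Lyrical Abstraction",
--             "Art Nouveau Modern",
--             "Fauvism",
--             "Action Painting",
--             "Naive Art Primitivism",
--             "Ukiyo",
--             "Colour Field Painting",
--         ]
--     ):
--         return 2
--     elif any(
--         genre in genres
--         for genre in ["Realism", "Romanticism", "Baroque", "Neoclassicism", "Rococo"]
--     ):
--         return 3
--     elif "Renaissance" in genres:
--         return 4
--     else:
--         return None
-- ===== SOURCE B (Python) =====
-- # B: one subgenre->category lookup built once (setdefault keeps 'Pop Art' at 1),
-- # then min over matched categories, default None.  Objective: simpler/idiomatic.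
-- _SUBGENRES = (
--     (1, ["Minimalism", "Pop Art", "Pointillism", "Symbolism"]),
--     (2, ["Impressionism", "Expressionism", "Post-Impressionism", "Surrealism",
--          "Abstract Expressionism", "Cubism", "Pop Art", "Abstract Art",
--          "Art Informel", "Color Field Painting", "Neo-Expressionism",
--          "Magic Realism", "Lyrical Abstraction", "Art Nouveau Modern",
--          "Fauvism", "Action Painting", "Naive Art Primitivism", "Ukiyo",
--          "Colour Field Painting"]),
--     (3, ["Realism", "Romanticism", "Baroque", "Neoclassicism", "Rococo"]),
--     (4, ["Renaissance"]),
-- )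
-- _LOOKUP = {}
-- for _cat, _subs in _SUBGENRES:
--     for _g in _subs:
--         _LOOKUP.setdefault(_g, _cat)
--
--
-- def categorize_genre(genres):
--     """Generate big genre based on sub-genres"""
--     return min((cat for g, cat in _LOOKUP.items() if g in genres), default=None)
-- ===== Notes on version B (the rewrite author's own statement) =====
-- stated objective: simpler
-- what changed: Replaced four ordered any()-scans over hard-coded tier lists with a single subgenre-to-category dict built once via setdefault (so 'Pop Art' stays at 1) and a min-reduction over the matched categories with default None.
import Mathlib
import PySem

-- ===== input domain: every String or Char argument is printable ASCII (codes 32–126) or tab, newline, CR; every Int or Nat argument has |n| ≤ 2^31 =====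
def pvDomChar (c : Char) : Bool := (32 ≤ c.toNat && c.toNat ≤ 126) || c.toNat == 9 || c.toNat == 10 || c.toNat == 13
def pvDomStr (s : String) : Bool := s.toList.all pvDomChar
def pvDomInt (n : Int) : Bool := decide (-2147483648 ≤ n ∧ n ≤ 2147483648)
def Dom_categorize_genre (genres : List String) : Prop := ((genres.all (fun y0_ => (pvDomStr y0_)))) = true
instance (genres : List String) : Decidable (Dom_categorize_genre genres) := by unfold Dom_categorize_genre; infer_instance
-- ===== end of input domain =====

-- B replaces A's four ordered any()-scans with one subgenre→category lookup table
-- built once (setdefault keeps "Pop Art" at 1) and a min-reduction; objective: simpler.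

-- ===== PORT A =====
def pvTier1 : List String := ["Minimalism", "Pop Art", "Pointillism", "Symbolism"]
def pvTier2 : List String :=
  ["Impressionism", "Expressionism", "Post-Impressionism", "Surrealism",
   "Abstract Expressionism", "Cubism", "Pop Art", "Abstract Art",
   "Art Informel", "Color Field Painting", "Neo-Expressionism",
   "Magic Realism", "Lyrical Abstraction", "Art Nouveau Modern",
   "Fauvism", "Action Painting", "Naive Art Primitivism", "Ukiyo",
   "Colour Field Painting"]
def pvTier3 : List String := ["Realism", "Romanticism", "Baroque", "Neoclassicism", "Rococo"]

def categorize_genre (genres : List String) : Option Int :=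
  if pvTier1.any (fun g => genres.contains g) then some 1
  else if pvTier2.any (fun g => genres.contains g) then some 2
  else if pvTier3.any (fun g => genres.contains g) then some 3
  else if genres.contains "Renaissance" then some 4
  else none

-- ===== PORT B =====
def pvSubgenres : List (Int × List String) :=
  [(1, ["Minimalism", "Pop Art", "Pointillism", "Symbolism"]),
   (2, ["Impressionism", "Expressionism", "Post-Impressionism", "Surrealism",
        "Abstract Expressionism", "Cubism", "Pop Art", "Abstract Art",
        "Art Informel", "Color Field Painting", "Neo-Expressionism",
        "Magic Realism", "Lyrical Abstraction", "Art Nouveau Modern",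
        "Fauvism", "Action Painting", "Naive Art Primitivism", "Ukiyo",
        "Colour Field Painting"]),
   (3, ["Realism", "Romanticism", "Baroque", "Neoclassicism", "Rococo"]),
   (4, ["Renaissance"])]

def pvLookup : PySem.Dict String Int :=
  pvSubgenres.foldl (fun d p => p.2.foldl (fun d g => d.setdefault g p.1) d) PySem.Dict.empty

-- min((cat for g, cat in _LOOKUP.items() if g in genres), default=None), as a running min
def categorize_genre_alt (genres : List String) : Option Int :=
  pvLookup.items.foldl
    (fun acc p =>
      if genres.contains p.1 then
        some (match acc with | none => p.2 | some m => min m p.2)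
      else acc)
    none

-- ===== PRECONDITION & SPEC =====
def Spec_categorize_genre (genres : List String) (out : Option Int) : Prop := out = categorize_genre_alt genres
instance (genres : List String) (out : Option Int) : Decidable (Spec_categorize_genre genres out) := by unfold Spec_categorize_genre; infer_instance

-- ===== CLAIM (what is proved, stated in full; the proofs are below) =====
def Claim_equal_categorize_genre : Prop := ∀ (genres : List String), Dom_categorize_genre genres → Spec_categorize_genre genres (categorize_genre genres)

-- ===== LEMMAS AND PROOFS =====

/-- The running-min step of B's fold. -/
def pvStep (genres : List String) (acc : Option Int) (p : String × Int) : Option Int :=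
  if genres.contains p.1 then
    some (match acc with | none => p.2 | some m => min m p.2)
  else acc

/-- If no key of the segment occurs in `genres`, the fold leaves the accumulator alone. -/
lemma pvFold_skip (genres : List String) (l : List (String × Int)) (acc : Option Int)
    (h : ∀ p ∈ l, p.1 ∉ genres) :
    l.foldl (pvStep genres) acc = acc := by
  induction l generalizing acc with
  | nil => rfl
  | cons p t ih =>
      have hstep : pvStep genres acc p = acc := by simp [pvStep, h p (by simp)]
      rw [List.foldl_cons, hstep]
      exact ih acc (fun q hq => h q (by simp [hq]))

/-- A minimum already at hand absorbs any segment of categories that are no smaller. -/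
lemma pvFold_absorb (genres : List String) (l : List (String × Int)) (m : Int)
    (h : ∀ p ∈ l, m ≤ p.2) :
    l.foldl (pvStep genres) (some m) = some m := by
  induction l with
  | nil => rfl
  | cons p t ih =>
      have hstep : pvStep genres (some m) p = some m := by
        by_cases hc : p.1 ∈ genres
        · simp [pvStep, hc, min_eq_left (h p (by simp))]
        · simp [pvStep, hc]
      rw [List.foldl_cons, hstep]
      exact ih (fun q hq => h q (by simp [hq]))

/-- On a segment of constant category `c` with at least one matching key, the fold yields `some c`. -/
lemma pvFold_hit (genres : List String) (l : List (String × Int)) (c : Int)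
    (hall : ∀ p ∈ l, p.2 = c) (h : ∃ p ∈ l, p.1 ∈ genres) :
    l.foldl (pvStep genres) none = some c := by
  induction l with
  | nil => simp at h
  | cons p t ih =>
      by_cases hc : p.1 ∈ genres
      · have hstep : pvStep genres none p = some c := by simp [pvStep, hc, hall p (by simp)]
        rw [List.foldl_cons, hstep]
        exact pvFold_absorb genres t c (fun q hq => le_of_eq (hall q (by simp [hq])).symm)
      · have hstep : pvStep genres none p = none := by simp [pvStep, hc]
        rw [List.foldl_cons, hstep]
        refine ih (fun q hq => hall q (by simp [hq])) ?_
        rcases h with ⟨q, hq, hqg⟩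
        rcases List.mem_cons.mp hq with rfl | hqt
        · exact absurd hqg hc
        · exact ⟨q, hqt, hqg⟩

def pvSeg1 : List (String × Int) :=
  [("Minimalism", 1), ("Pop Art", 1), ("Pointillism", 1), ("Symbolism", 1)]
def pvSeg2 : List (String × Int) :=
  [("Impressionism", 2), ("Expressionism", 2), ("Post-Impressionism", 2), ("Surrealism", 2),
   ("Abstract Expressionism", 2), ("Cubism", 2), ("Abstract Art", 2),
   ("Art Informel", 2), ("Color Field Painting", 2), ("Neo-Expressionism", 2),
   ("Magic Realism", 2), ("Lyrical Abstraction", 2), ("Art Nouveau Modern", 2),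
   ("Fauvism", 2), ("Action Painting", 2), ("Naive Art Primitivism", 2),
   ("Ukiyo", 2), ("Colour Field Painting", 2)]
def pvSeg3 : List (String × Int) :=
  [("Realism", 3), ("Romanticism", 3), ("Baroque", 3), ("Neoclassicism", 3), ("Rococo", 3)]
def pvSeg4 : List (String × Int) := [("Renaissance", 4)]

lemma pvLookup_items : pvLookup.items = pvSeg1 ++ pvSeg2 ++ pvSeg3 ++ pvSeg4 := by decide

-- ===== VERDICT (by name: the statement is the Claim_ definition above) =====
theorem categorize_genre_spec : Claim_equal_categorize_genre := by
  intro genres _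
  show categorize_genre genres = categorize_genre_alt genres
  have hB : categorize_genre_alt genres =
      (pvSeg1 ++ pvSeg2 ++ pvSeg3 ++ pvSeg4).foldl (pvStep genres) none := by
    rw [categorize_genre_alt, pvLookup_items]; rfl
  rw [hB, List.foldl_append, List.foldl_append, List.foldl_append]
  by_cases h1 : ∃ p ∈ pvSeg1, p.1 ∈ genres
  · rw [pvFold_hit genres pvSeg1 1 (by decide) h1,
        pvFold_absorb genres pvSeg2 1 (by decide),
        pvFold_absorb genres pvSeg3 1 (by decide),
        pvFold_absorb genres pvSeg4 1 (by decide)]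
    have hc1 : ∃ x ∈ pvTier1, x ∈ genres := by
      simp [pvSeg1] at h1; simp [pvTier1]; tauto
    simp [categorize_genre, hc1]
  · push Not at h1
    rw [pvFold_skip genres pvSeg1 none h1]
    have hPop : "Pop Art" ∉ genres := h1 ("Pop Art", 1) (by decide)
    have hc1 : ¬ ∃ x ∈ pvTier1, x ∈ genres := by
      simp [pvSeg1] at h1; simp [pvTier1]; tauto
    by_cases h2 : ∃ p ∈ pvSeg2, p.1 ∈ genres
    · rw [pvFold_hit genres pvSeg2 2 (by decide) h2,
          pvFold_absorb genres pvSeg3 2 (by decide),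
          pvFold_absorb genres pvSeg4 2 (by decide)]
      have hc2 : ∃ x ∈ pvTier2, x ∈ genres := by
        simp [pvSeg2] at h2; simp [pvTier2]; tauto
      simp [categorize_genre, hc1, hc2]
    · push Not at h2
      rw [pvFold_skip genres pvSeg2 none h2]
      have hc2 : ¬ ∃ x ∈ pvTier2, x ∈ genres := by
        simp [pvSeg2] at h2; simp [pvTier2]; tauto
      by_cases h3 : ∃ p ∈ pvSeg3, p.1 ∈ genres
      · rw [pvFold_hit genres pvSeg3 3 (by decide) h3,
            pvFold_absorb genres pvSeg4 3 (by decide)]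
        have hc3 : ∃ x ∈ pvTier3, x ∈ genres := by
          simp [pvSeg3] at h3; simp [pvTier3]; tauto
        simp [categorize_genre, hc1, hc2, hc3]
      · push Not at h3
        rw [pvFold_skip genres pvSeg3 none h3]
        have hc3 : ¬ ∃ x ∈ pvTier3, x ∈ genres := by
          simp [pvSeg3] at h3; simp [pvTier3]; tauto
        by_cases h4 : "Renaissance" ∈ genres
        · have e4 : pvSeg4.foldl (pvStep genres) none = some 4 :=
            pvFold_hit genres pvSeg4 4 (by decide) ⟨("Renaissance", 4), by decide, h4⟩
          rw [e4]
          simp [categorize_genre, hc1, hc2, hc3, h4]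
        · have e4 : pvSeg4.foldl (pvStep genres) none = none :=
            pvFold_skip genres pvSeg4 none (by simpa [pvSeg4] using h4)
          rw [e4]
          simp [categorize_genre, hc1, hc2, hc3, h4]
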